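-- pv_equiv track=rewrite | github.com/jujoesgo3/time-series-to-complex-networks- | src/network_construction/entropia_dirigido.py | crear_ind
-- ===== SOURCE A (Python) =====
-- def crear_ind(x, tamaño_w):
--     x_w1 = []
--
--     for i in range(len(x)):
--         sub = x[i:i+tamaño_w]
--         x_w1.append(sub)
--
--     ind_x1 = []
--     for i in range(len(x_w1)-tamaño_w):
--         ind = [index for index, value in sorted(enumerate(x_w1[i]), key=lambda x: x[1])]
--         posiciones = sorted(range(len(ind)), key=lambda k: ind[k])
--         ind_x1.append(posiciones)
--
--     return ind_x1
-- ===== SOURCE B (Python) =====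
-- def crear_ind(x, tamaño_w):
--     # direct rank-by-counting per window, no sorting
--     out = []
--     for i in range(len(x) - tamaño_w):
--         win = x[i:i+tamaño_w]
--         ranks = []
--         for j, vj in enumerate(win):
--             r = 0
--             for k, vk in enumerate(win):
--                 if vk < vj or (vk == vj and k < j):
--                     r += 1
--             ranks.append(r)
--         out.append(ranks)
--     return out
-- ===== Notes on version B (the rewrite author's own statement) =====
-- stated objective: alternative
-- what changed: Replaces A's double argsort (sort enumerate by value, then argsort the resulting index list) by a direct stable-rank computation: each element's rank is counted as the number of window elements that are smaller, or equal with a smaller index; no sorting at all.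
import Mathlib
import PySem

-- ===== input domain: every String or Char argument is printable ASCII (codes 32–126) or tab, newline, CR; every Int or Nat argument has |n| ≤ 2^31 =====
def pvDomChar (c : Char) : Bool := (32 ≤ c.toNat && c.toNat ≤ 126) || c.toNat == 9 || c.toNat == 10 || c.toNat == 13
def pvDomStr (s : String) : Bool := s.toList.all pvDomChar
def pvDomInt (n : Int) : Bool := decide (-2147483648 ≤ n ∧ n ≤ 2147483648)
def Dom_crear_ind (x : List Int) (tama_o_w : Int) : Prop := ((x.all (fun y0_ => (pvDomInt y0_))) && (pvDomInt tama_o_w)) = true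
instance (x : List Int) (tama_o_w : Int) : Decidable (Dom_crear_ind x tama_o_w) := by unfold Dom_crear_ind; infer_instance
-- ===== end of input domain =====

-- B replaces A's double argsort per window by a direct stable-rank count (no sorting); same values, alternative algorithm.

-- ===== PORT A =====
def crear_ind (x : List Int) (tama_o_w : Int) : List (List Int) :=
  let x_w1 : List (List Int) :=
    (PySem.List.pyRange 0 (x.length : Int)).foldl
      (fun acc i => acc ++ [PySem.List.slice x (some i) (some (i + tama_o_w))]) []
  (PySem.List.pyRange 0 ((x_w1.length : Int) - tama_o_w)).foldl
    (fun acc i =>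
      let ind : List Int :=
        (PySem.List.sorted (PySem.List.enumerate (PySem.List.pyGetD x_w1 i []))
          (fun p => p.2)).map (fun p => p.1)
      let posiciones : List Int :=
        PySem.List.sorted (PySem.List.pyRange 0 (ind.length : Int))
          (fun k => PySem.List.pyGetD ind k 0)
      acc ++ [posiciones]) []

-- ===== PORT B =====
def crear_ind_alt (x : List Int) (tama_o_w : Int) : List (List Int) :=
  (PySem.List.pyRange 0 ((x.length : Int) - tama_o_w)).foldl
    (fun out i =>
      let win := PySem.List.slice x (some i) (some (i + tama_o_w))
      let ranks : List Int :=
        (PySem.List.enumerate win).foldl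
          (fun rs jv =>
            let r : Int := (PySem.List.enumerate win).foldl
              (fun r kv => if kv.2 < jv.2 ∨ (kv.2 = jv.2 ∧ kv.1 < jv.1) then r + 1 else r) 0
            rs ++ [r]) []
      out ++ [ranks]) []

-- ===== PRECONDITION & SPEC =====
-- For tama_o_w < 0 the second loop of A runs past the end of x_w1 and x_w1[i] raises IndexError.
def Pre_crear_ind (x : List Int) (tama_o_w : Int) : Prop := 0 ≤ tama_o_w
instance (x : List Int) (tama_o_w : Int) : Decidable (Pre_crear_ind x tama_o_w) := by unfold Pre_crear_ind; infer_instance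
def pvWitness_crear_ind : List Int × Int := ([3, 1, 2, 1, 4], 3)

def Spec_crear_ind (x : List Int) (tama_o_w : Int) (out : List (List Int)) : Prop := out = crear_ind_alt x tama_o_w
instance (x : List Int) (tama_o_w : Int) (out : List (List Int)) : Decidable (Spec_crear_ind x tama_o_w out) := by unfold Spec_crear_ind; infer_instance

-- ===== CLAIM (what is proved, stated in full; the proofs are below) =====
def Claim_equal_crear_ind : Prop := ∀ (x : List Int) (tama_o_w : Int), Dom_crear_ind x tama_o_w → Pre_crear_ind x tama_o_w → Spec_crear_ind x tama_o_w (crear_ind x tama_o_w)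

-- ===== LEMMAS AND PROOFS =====

-- strict lexicographic order on (index, value) pairs, comparing value first
def lexR (a b : Int × Int) : Prop := a.2 < b.2 ∨ (a.2 = b.2 ∧ a.1 < b.1)

-- Boolean form of lexR (kept instance-free so countP rewrites are syntactic)
def lexb (a b : Int × Int) : Bool := decide (a.2 < b.2 ∨ (a.2 = b.2 ∧ a.1 < b.1))

theorem lexb_iff (a b : Int × Int) : lexb a b = true ↔ lexR a b := by
  simp [lexb, lexR]

theorem lexR_asymm {a b : Int × Int} (h : lexR a b) : ¬ lexR b a := by
  unfold lexR at *; omega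

theorem lexR_irrefl (a : Int × Int) : ¬ lexR a a := by
  unfold lexR; omega

-- inserting an element whose first component dominates keeps lexR-sortedness (stability of Python's sort)
theorem insertBy_pairwise_lex (x : Int × Int) :
    ∀ (acc : List (Int × Int)), acc.Pairwise lexR → (∀ p ∈ acc, p.1 < x.1) →
    (PySem.List.insertBy (fun a b => decide (a.2 < b.2)) x acc).Pairwise lexR := by
  intro acc
  induction acc with
  | nil => intro _ _; simp [PySem.List.insertBy, lexR]
  | cons y ys ih =>
    intro h hx
    rcases List.pairwise_cons.1 h with ⟨hy, hys⟩
    rw [PySem.List.insertBy]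
    by_cases hc : x.2 < y.2
    · simp only [hc, decide_true, if_true]
      refine List.pairwise_cons.2 ⟨?_, h⟩
      intro z hz
      rcases List.mem_cons.1 hz with rfl | hz
      · exact Or.inl hc
      · rcases hy z hz with h1 | ⟨h1, _⟩
        · exact Or.inl (lt_trans hc h1)
        · exact Or.inl (h1 ▸ hc)
    · simp only [hc, decide_false, Bool.false_eq_true, if_false]
      refine List.pairwise_cons.2 ⟨?_, ?_⟩
      · intro z hz
        rcases (PySem.List.mem_insertBy _ _ _ _).1 hz with rfl | hz
        · have hyx := hx y (List.mem_cons_self ..)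
          unfold lexR; unfold lexR at *; omega
        · exact hy z hz
      · exact ih hys (fun p hp => hx p (List.mem_cons_of_mem _ hp))

theorem foldl_insertBy_pairwise_lex :
    ∀ (l acc : List (Int × Int)), l.Pairwise (fun a b => a.1 < b.1) → acc.Pairwise lexR →
    (∀ p ∈ acc, ∀ q ∈ l, p.1 < q.1) →
    (l.foldl (fun acc x => PySem.List.insertBy (fun a b => decide (a.2 < b.2)) x acc) acc).Pairwise lexR := by
  intro l
  induction l with
  | nil => intro acc _ h _; simpa using h
  | cons q l ih =>
    intro acc hl hacc hlt
    simp only [List.foldl_cons]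
    refine ih _ (List.pairwise_cons.1 hl).2 ?_ ?_
    · exact insertBy_pairwise_lex q acc hacc (fun p hp => hlt p hp q (List.mem_cons_self ..))
    · intro p hp r hr
      rcases (PySem.List.mem_insertBy _ _ _ _).1 hp with rfl | h1
      · exact (List.pairwise_cons.1 hl).1 r hr
      · exact hlt p h1 r (List.mem_cons_of_mem _ hr)

theorem sorted_snd_pairwise_lex (l : List (Int × Int)) (h : l.Pairwise (fun a b => a.1 < b.1)) :
    (PySem.List.sorted l (fun p => p.2)).Pairwise lexR := by
  rw [PySem.List.sorted_eq_foldl_insertBy]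
  exact foldl_insertBy_pairwise_lex l [] h (List.Pairwise.nil) (by simp)

-- in a lexR-sorted list, the index of an element equals the number of lexR-smaller elements
theorem countP_pairwise_getElem (f : Int × Int → Int × Int → Bool)
    (hf : ∀ a b, f a b = true ↔ lexR a b) :
    ∀ (l : List (Int × Int)), l.Pairwise lexR → ∀ (t : Nat) (ht : t < l.length),
    l.countP (fun q => f q l[t]) = t := by
  intro l
  induction l with
  | nil => intro _ t ht; simp at ht
  | cons p tl ih =>
    intro h t ht
    rcases List.pairwise_cons.1 h with ⟨hp, htl⟩
    cases t with
    | zero =>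
      simp only [List.getElem_cons_zero, List.countP_cons]
      have h0 : tl.countP (fun q => f q p) = 0 :=
        List.countP_eq_zero.2 (fun a ha hfa => lexR_asymm (hp a ha) ((hf a p).1 hfa))
      have hff : f p p = false := by
        cases hce : f p p
        · rfl
        · exact absurd ((hf p p).1 hce) (lexR_irrefl p)
      rw [h0, hff]
      simp
    | succ t =>
      simp only [List.getElem_cons_succ, List.countP_cons]
      have ht' : t < tl.length := by simpa using ht
      have hdp : f p tl[t] = true := (hf p tl[t]).2 (hp _ (tl.getElem_mem ht'))
      rw [hdp, ih htl t ht']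
      simp

-- the per-window identity: A's double argsort equals the list of stable ranks
theorem window_eq (sub : List Int) :
    PySem.List.sorted
      (PySem.List.pyRange 0
        ((((PySem.List.sorted (PySem.List.enumerate sub) (fun p => p.2)).map (fun p => p.1)).length : Int)))
      (fun k => PySem.List.pyGetD ((PySem.List.sorted (PySem.List.enumerate sub) (fun p => p.2)).map (fun p => p.1)) k 0)
    = (PySem.List.enumerate sub).map
        (fun jv => ((PySem.List.enumerate sub).countP (fun q => lexb q jv) : Int)) := by
  set e := PySem.List.enumerate sub with he
  set s := PySem.List.sorted e (fun p => p.2) with hs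
  have hps : s.Pairwise lexR := sorted_snd_pairwise_lex e (PySem.List.pairwise_lt_enumerate sub 0)
  have hperm : s.Perm e := PySem.List.sorted_perm e (fun p => p.2) false
  have hslen : s.length = sub.length := by
    rw [hs, PySem.List.length_sorted, he, PySem.List.length_enumerate]
  -- for jv ∈ e, its stable rank is its index in s
  have hrank : ∀ jv ∈ e, ∃ t : Nat, ∃ ht : t < s.length,
      s[t] = jv ∧ e.countP (fun q => lexb q jv) = t := by
    intro jv hjv
    have hjs : jv ∈ s := ((PySem.List.mem_sorted e (fun p => p.2) false jv).2 hjv)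
    obtain ⟨t, ht, hget⟩ := List.getElem_of_mem hjs
    refine ⟨t, ht, hget, ?_⟩
    rw [← (hperm.countP_eq _), ← hget]
    exact countP_pairwise_getElem lexb lexb_iff s hps t ht
  have hkey : ∀ jv ∈ e,
      PySem.List.pyGetD (s.map (fun p => p.1)) ((e.countP (fun q => lexb q jv) : Nat) : Int) 0 = jv.1 := by
    intro jv hjv
    obtain ⟨t, ht, hget, hcnt⟩ := hrank jv hjv
    rw [hcnt, PySem.List.pyGetD_natCast]
    have htm : t < (s.map (fun p => p.1)).length := by simpa using ht
    rw [List.getD_eq_getElem _ _ htm]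
    simp [hget]
  have hpw : (e.map (fun jv => ((e.countP (fun q => lexb q jv) : Nat) : Int))).Pairwise
      (fun a b => PySem.List.pyGetD (s.map (fun p => p.1)) a 0 < PySem.List.pyGetD (s.map (fun p => p.1)) b 0) := by
    rw [List.pairwise_map]
    refine (PySem.List.pairwise_lt_enumerate sub 0).imp_of_mem ?_
    intro a b ha hb hab
    rw [hkey a ha, hkey b hb]
    exact hab
  have hnd : (e.map (fun jv => ((e.countP (fun q => lexb q jv) : Nat) : Int))).Nodup :=
    hpw.imp (fun {a b} h => by intro hab; rw [hab] at h; exact lt_irrefl _ h)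
  have hndr : (PySem.List.pyRange 0 (sub.length : Int)).Nodup := by
    rw [PySem.List.pyRange_zero_natCast]
    exact List.Nodup.map (fun a b h => by exact_mod_cast h) (List.nodup_range)
  have hmem : ∀ a, a ∈ e.map (fun jv => ((e.countP (fun q => lexb q jv) : Nat) : Int)) ↔
      a ∈ PySem.List.pyRange 0 (sub.length : Int) := by
    intro a
    constructor
    · intro ha
      obtain ⟨jv, hjv, hfa⟩ := List.mem_map.1 ha
      obtain ⟨t, ht, _, hcnt⟩ := hrank jv hjv
      rw [← hfa, hcnt]
      exact PySem.List.mem_pyRange_one.2 ⟨by positivity, by exact_mod_cast hslen ▸ ht⟩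
    · intro ha
      rcases PySem.List.mem_pyRange_one.1 ha with ⟨h0, h1⟩
      have hts : a.toNat < s.length := by rw [hslen]; omega
      refine List.mem_map.2 ⟨s[a.toNat], hperm.subset (s.getElem_mem hts), ?_⟩
      have := countP_pairwise_getElem lexb lexb_iff s hps a.toNat hts
      rw [hperm.countP_eq _] at this
      rw [this]
      omega
  have hpermys : (e.map (fun jv => ((e.countP (fun q => lexb q jv) : Nat) : Int))).Perm
      (PySem.List.pyRange 0 (sub.length : Int)) :=
    (List.perm_ext_iff_of_nodup hnd hndr).2 hmem
  have hlen2 : (((s.map (fun p => p.1)).length : Nat) : Int) = (sub.length : Int) := by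
    simp [hslen]
  rw [hlen2]
  exact PySem.List.sorted_eq_of_perm_of_pairwise_lt _ _ _ hpermys hpw

-- ===== VERDICT (by name: the statement is the Claim_ definition above) =====
theorem crear_ind_spec : Claim_equal_crear_ind := by
  intro x w _ hpre
  have hw : (0:Int) ≤ w := hpre
  show crear_ind x w = crear_ind_alt x w
  simp only [crear_ind, crear_ind_alt, PySem.List.foldl_append_singleton_eq_map, List.nil_append]
  have hlen : ((List.map (fun i => PySem.List.slice x (some i) (some (i + w)))
      (PySem.List.pyRange 0 (x.length : Int))).length : Int) = (x.length : Int) := by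
    simp [PySem.List.pyRange_zero_natCast]
  rw [hlen]
  refine List.map_congr_left ?_
  intro i hi
  rcases PySem.List.mem_pyRange_one.1 hi with ⟨h0, h1⟩
  have hik : i = ((i.toNat : Nat) : Int) := by omega
  have hk : i.toNat < x.length := by omega
  rw [hik, PySem.List.pyGetD_map_pyRange _ _ _ _ hk]
  rw [window_eq (PySem.List.slice x (some ((i.toNat : Nat) : Int)) (some (((i.toNat : Nat) : Int) + w)))]
  simp only [PySem.List.foldl_ite_add_one, zero_add]
  refine List.map_congr_left ?_
  intro jv _
  rfl
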